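-- pv_equiv track=rewrite | github.com/Cissou34730/Azure-Architect-Assistant | backend/app/features/projects/application/quality_gate_service.py | _derive_waf_status
-- ===== SOURCE A (Python) =====
-- from typing import Any, Mapping, Protocol
--
-- def _derive_waf_status(item: Mapping[str, Any]) -> str:
--     evaluations = _coerce_mapping_list(item.get("evaluations"))
--     statuses = {
--         str(evaluation.get("status") or "").strip().lower()
--         for evaluation in evaluations
--         if isinstance(evaluation, Mapping)
--     }
--     if "fixed" in statuses:
--         return "covered"
--     if "in_progress" in statuses:
--         return "partial"
--     return "not-covered"
--
-- def _coerce_mapping_list(value: object) -> list[dict[str, Any]]: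
--     if isinstance(value, Mapping):
--         return [dict(item) for item in value.values() if isinstance(item, Mapping)]
--     if isinstance(value, list | tuple):
--         return [dict(item) for item in value if isinstance(item, Mapping)]
--     return []
-- ===== SOURCE B (Python) =====
-- from typing import Any, Mapping
--
-- def _derive_waf_status(item: Mapping[str, Any]) -> str:
--     rank = 0
--     for evaluation in _coerce_mapping_list(item.get("evaluations")):
--         if isinstance(evaluation, Mapping):
--             status = str(evaluation.get("status") or "").strip().lower()
--             if status == "fixed":
--                 rank = max(rank, 2)
--             elif status == "in_progress":
--                 rank = max(rank, 1)
--     return "covered" if rank == 2 else ("partial" if rank == 1 else "not-covered")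
--
-- def _coerce_mapping_list(value: object) -> list[dict[str, Any]]:
--     if isinstance(value, Mapping):
--         return [dict(item) for item in value.values() if isinstance(item, Mapping)]
--     if isinstance(value, list | tuple):
--         return [dict(item) for item in value if isinstance(item, Mapping)]
--     return []
-- ===== Notes on version B (the rewrite author's own statement) =====
-- stated objective: simpler
-- what changed: Replaces building a set of all normalized statuses plus two prioritized membership checks with a single pass that folds the maximum priority (fixed=2, in_progress=1, other=0) over the evaluations and maps the final rank to the result string.
import Mathlib
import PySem

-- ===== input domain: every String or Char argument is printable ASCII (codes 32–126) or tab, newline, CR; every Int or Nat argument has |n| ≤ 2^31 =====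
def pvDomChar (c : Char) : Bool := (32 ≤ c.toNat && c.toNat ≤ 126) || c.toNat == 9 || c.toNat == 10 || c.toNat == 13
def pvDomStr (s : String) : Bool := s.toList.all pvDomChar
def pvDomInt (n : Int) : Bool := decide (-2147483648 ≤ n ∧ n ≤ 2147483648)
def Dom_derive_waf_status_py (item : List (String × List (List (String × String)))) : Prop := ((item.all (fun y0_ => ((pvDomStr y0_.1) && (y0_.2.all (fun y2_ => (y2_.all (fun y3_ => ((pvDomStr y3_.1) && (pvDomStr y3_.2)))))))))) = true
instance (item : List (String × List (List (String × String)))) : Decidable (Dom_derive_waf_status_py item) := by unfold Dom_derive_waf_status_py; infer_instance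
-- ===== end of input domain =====

-- B replaces A's status-set construction and two prioritized membership checks with a single
-- fold taking the maximum status priority (fixed=2, in_progress=1, other=0); objective: simpler.


-- shared helpers (identical normalization in both Pythons):
-- str(evaluation.get("status") or "").strip().lower()
-- ('x or ""' and 'str(...)' are the identity on the string x, so they leave no trace here)
def pvStatusNorm (e : List (String × String)) : String :=
  PySem.Str.lower (PySem.Str.strip ((PySem.Dict.ofList e).getD "status" ""))

-- _coerce_mapping_list: under the type convention the value is a list whose elements are all
-- mappings, so the comprehension returns the list itself, and a missing key (None) gives []
def pvCoerce (v : Option (List (List (String × String)))) : List (List (String × String)) :=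
  v.getD []

-- ===== PORT A =====
def derive_waf_status_py (item : List (String × List (List (String × String)))) : String :=
  let evaluations := pvCoerce ((PySem.Dict.ofList item).get? "evaluations")
  let statuses : PySem.Set String := PySem.Set.ofList (evaluations.map pvStatusNorm)
  if "fixed" ∈ statuses then "covered"
  else if "in_progress" ∈ statuses then "partial"
  else "not-covered"

-- ===== PORT B =====
def derive_waf_status_py_alt (item : List (String × List (List (String × String)))) : String :=
  let rank : Nat := (pvCoerce ((PySem.Dict.ofList item).get? "evaluations")).foldl
    (fun r e =>
      let status := pvStatusNorm e
      if status = "fixed" then max r 2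
      else if status = "in_progress" then max r 1
      else r) 0
  if rank = 2 then "covered" else if rank = 1 then "partial" else "not-covered"

-- ===== PRECONDITION & SPEC =====
def Spec_derive_waf_status_py (item : List (String × List (List (String × String)))) (out : String) : Prop := out = derive_waf_status_py_alt item
instance (item : List (String × List (List (String × String)))) (out : String) : Decidable (Spec_derive_waf_status_py item out) := by unfold Spec_derive_waf_status_py; infer_instance

-- ===== CLAIM (what is proved, stated in full; the proofs are below) =====
def Claim_equal_derive_waf_status_py : Prop := ∀ (item : List (String × List (List (String × String)))), Dom_derive_waf_status_py item → Spec_derive_waf_status_py item (derive_waf_status_py item)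

-- ===== LEMMAS AND PROOFS =====

-- B's fold computes the max of the accumulator and the winning priority of the status list
theorem pvFold_rank (ss : List String) (r : Nat) :
    ss.foldl (fun r s => if s = "fixed" then max r 2
      else if s = "in_progress" then max r 1 else r) r
    = max r (if "fixed" ∈ ss then 2 else if "in_progress" ∈ ss then 1 else 0) := by
  induction ss generalizing r with
  | nil => simp
  | cons x xs ih =>
    have h2 : (if "fixed" ∈ xs then 2 else if "in_progress" ∈ xs then 1 else 0) ≤ 2 := by
      split_ifs <;> omega
    simp only [List.foldl_cons, List.mem_cons, ih]
    by_cases hf : x = "fixed"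
    · simp only [hf, true_or, if_true]
      generalize (if "fixed" ∈ xs then 2 else if "in_progress" ∈ xs then 1 else 0) = v at h2 ⊢
      omega
    · have hf' : ¬ ("fixed" = x) := fun h => hf h.symm
      by_cases hp : x = "in_progress"
      · simp only [hp, true_or, if_true,
          (show ¬ (("fixed" : String) = "in_progress") by decide), false_or,
          if_neg (show ¬ (("in_progress" : String) = "fixed") by decide)]
        by_cases h1 : "fixed" ∈ xs <;> by_cases h3 : "in_progress" ∈ xs <;>
          simp only [h1, h3, if_true, if_false] <;> omega
      · have hp' : ¬ ("in_progress" = x) := fun h => hp h.symm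
        simp only [hf, hp, hf', hp', if_false, false_or]

theorem derive_eq (item : List (String × List (List (String × String)))) :
    derive_waf_status_py item = derive_waf_status_py_alt item := by
  have hB : derive_waf_status_py_alt item =
      (let rank := ((pvCoerce ((PySem.Dict.ofList item).get? "evaluations")).map pvStatusNorm).foldl
          (fun r s => if s = "fixed" then max r 2 else if s = "in_progress" then max r 1 else r) 0
       if rank = 2 then "covered" else if rank = 1 then "partial" else "not-covered") := by
    simp only [derive_waf_status_py_alt, List.foldl_map]
  rw [hB]
  unfold derive_waf_status_py
  simp only [pvFold_rank, PySem.Set.mem_ofList, Nat.zero_max]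
  by_cases hf : "fixed" ∈ (pvCoerce ((PySem.Dict.ofList item).get? "evaluations")).map pvStatusNorm <;>
    by_cases hp : "in_progress" ∈ (pvCoerce ((PySem.Dict.ofList item).get? "evaluations")).map pvStatusNorm <;>
      simp [hf, hp]

-- ===== VERDICT (by name: the statement is the Claim_ definition above) =====
theorem derive_waf_status_py_spec : Claim_equal_derive_waf_status_py := by
  intro item _
  unfold Spec_derive_waf_status_py
  exact derive_eq item
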